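-- pv_equiv track=rewrite | github.com/llctechboost/stock-scanner | dashboard.py | _categorize_stock
-- ===== SOURCE A (Python) =====
-- def _categorize_stock(stock):
--     """Categorize into breakout, base, or pivot based on patterns."""
--     patterns_lower = [p.lower() for p in stock.get('patterns_raw', [])]
--     for p in patterns_lower:
--         if 'cup' in p or 'handle' in p or 'high tight' in p or 'htf' in p:
--             return 'breakout'
--     for p in patterns_lower:
--         if 'flat' in p or 'ascending' in p:
--             return 'base'
--     for p in patterns_lower:
--         if 'pocket' in p or 'pivot' in p:
--             return 'pivot'
--     return 'breakout'
-- ===== SOURCE B (Python) =====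
-- def _categorize_stock(stock):
--     """Categorize into breakout, base, or pivot based on patterns (single pass collecting flags)."""
--     has_breakout = has_base = has_pivot = False
--     for raw in stock.get('patterns_raw', []):
--         p = raw.lower()
--         if 'cup' in p or 'handle' in p or 'high tight' in p or 'htf' in p:
--             has_breakout = True
--         if 'flat' in p or 'ascending' in p:
--             has_base = True
--         if 'pocket' in p or 'pivot' in p:
--             has_pivot = True
--     if has_breakout:
--         return 'breakout'
--     if has_base:
--         return 'base'
--     if has_pivot:
--         return 'pivot'
--     return 'breakout'
-- ===== Notes on version B (the rewrite author's own statement) =====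
-- stated objective: alternative
-- what changed: Replaced the three sequential early-return scans over a prebuilt lowered list with one single pass over the raw patterns that lowers each string once and collects three category flags, followed by a priority-ordered return.
import Mathlib
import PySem

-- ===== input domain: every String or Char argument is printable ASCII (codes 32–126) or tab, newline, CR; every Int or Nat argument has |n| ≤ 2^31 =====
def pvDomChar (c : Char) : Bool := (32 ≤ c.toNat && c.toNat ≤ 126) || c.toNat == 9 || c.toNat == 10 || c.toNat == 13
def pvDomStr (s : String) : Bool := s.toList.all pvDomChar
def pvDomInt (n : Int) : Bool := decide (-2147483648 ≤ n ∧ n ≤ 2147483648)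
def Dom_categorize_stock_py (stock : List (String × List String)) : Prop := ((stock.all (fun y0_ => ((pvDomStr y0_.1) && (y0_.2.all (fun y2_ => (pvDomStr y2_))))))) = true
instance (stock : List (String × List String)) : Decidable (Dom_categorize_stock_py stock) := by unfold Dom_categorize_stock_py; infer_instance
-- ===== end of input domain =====

-- B replaces A's three sequential early-return scans with a single pass collecting three
-- category flags, then returns by priority; same values everywhere (alternative decomposition).


-- ===== PORT A =====
-- keyword tests shared by both ports (the same membership expressions as the Python)
def pvIsBreakout (p : String) : Bool :=
  PySem.Str.isIn "cup" p || PySem.Str.isIn "handle" p ||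
  PySem.Str.isIn "high tight" p || PySem.Str.isIn "htf" p

def pvIsBase (p : String) : Bool :=
  PySem.Str.isIn "flat" p || PySem.Str.isIn "ascending" p

def pvIsPivot (p : String) : Bool :=
  PySem.Str.isIn "pocket" p || PySem.Str.isIn "pivot" p

-- A's first 'for' loop with its early return
def pvLoop1 : List String → Option String
  | [] => none
  | p :: rest => if pvIsBreakout p then some "breakout" else pvLoop1 rest

-- A's second 'for' loop
def pvLoop2 : List String → Option String
  | [] => none
  | p :: rest => if pvIsBase p then some "base" else pvLoop2 rest

-- A's third 'for' loop
def pvLoop3 : List String → Option String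
  | [] => none
  | p :: rest => if pvIsPivot p then some "pivot" else pvLoop3 rest

def categorize_stock_py (stock : List (String × List String)) : String :=
  let patterns_lower :=
    ((PySem.Dict.mk stock).getD "patterns_raw" []).map (fun p => PySem.Str.lower p)
  match pvLoop1 patterns_lower with
  | some r => r
  | none =>
    match pvLoop2 patterns_lower with
    | some r => r
    | none =>
      match pvLoop3 patterns_lower with
      | some r => r
      | none => "breakout"

-- ===== PORT B =====
-- B's single pass: fold over the raw patterns, lowering each once and or-ing three flags
def pvFlags (raws : List String) : Bool × Bool × Bool :=
  raws.foldl
    (fun acc raw =>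
      let p := PySem.Str.lower raw
      (acc.1 || pvIsBreakout p, acc.2.1 || pvIsBase p, acc.2.2 || pvIsPivot p))
    (false, false, false)

def categorize_stock_py_alt (stock : List (String × List String)) : String :=
  let flags := pvFlags ((PySem.Dict.mk stock).getD "patterns_raw" [])
  if flags.1 then "breakout"
  else if flags.2.1 then "base"
  else if flags.2.2 then "pivot"
  else "breakout"

-- ===== PRECONDITION & SPEC =====
def Spec_categorize_stock_py (stock : List (String × List String)) (out : String) : Prop := out = categorize_stock_py_alt stock
instance (stock : List (String × List String)) (out : String) : Decidable (Spec_categorize_stock_py stock out) := by unfold Spec_categorize_stock_py; infer_instance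

-- ===== CLAIM (what is proved, stated in full; the proofs are below) =====
def Claim_equal_categorize_stock_py : Prop := ∀ (stock : List (String × List String)), Dom_categorize_stock_py stock → Spec_categorize_stock_py stock (categorize_stock_py stock)

-- ===== LEMMAS AND PROOFS =====
lemma pvLoop1_eq (xs : List String) :
    pvLoop1 xs = if xs.any pvIsBreakout then some "breakout" else none := by
  induction xs with
  | nil => simp [pvLoop1]
  | cons p rest ih => by_cases h : pvIsBreakout p <;> simp [pvLoop1, h, ih]

lemma pvLoop2_eq (xs : List String) :
    pvLoop2 xs = if xs.any pvIsBase then some "base" else none := by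
  induction xs with
  | nil => simp [pvLoop2]
  | cons p rest ih => by_cases h : pvIsBase p <;> simp [pvLoop2, h, ih]

lemma pvLoop3_eq (xs : List String) :
    pvLoop3 xs = if xs.any pvIsPivot then some "pivot" else none := by
  induction xs with
  | nil => simp [pvLoop3]
  | cons p rest ih => by_cases h : pvIsPivot p <;> simp [pvLoop3, h, ih]

lemma pvFlags_go (raws : List String) (b1 b2 b3 : Bool) :
    raws.foldl
      (fun acc raw =>
        let p := PySem.Str.lower raw
        (acc.1 || pvIsBreakout p, acc.2.1 || pvIsBase p, acc.2.2 || pvIsPivot p))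
      (b1, b2, b3)
    = (b1 || raws.any (fun r => pvIsBreakout (PySem.Str.lower r)),
       b2 || raws.any (fun r => pvIsBase (PySem.Str.lower r)),
       b3 || raws.any (fun r => pvIsPivot (PySem.Str.lower r))) := by
  induction raws generalizing b1 b2 b3 with
  | nil => simp
  | cons r rest ih => simp [ih, Bool.or_assoc]

lemma pvFlags_eq (raws : List String) :
    pvFlags raws
    = (raws.any (fun r => pvIsBreakout (PySem.Str.lower r)),
       raws.any (fun r => pvIsBase (PySem.Str.lower r)),
       raws.any (fun r => pvIsPivot (PySem.Str.lower r))) := by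
  simp [pvFlags, pvFlags_go]

-- ===== VERDICT (by name: the statement is the Claim_ definition above) =====
theorem categorize_stock_py_spec : Claim_equal_categorize_stock_py := by
  intro stock _
  unfold Spec_categorize_stock_py categorize_stock_py categorize_stock_py_alt
  simp only [pvLoop1_eq, pvLoop2_eq, pvLoop3_eq, pvFlags_eq]
  simp only [List.any_map, Function.comp_def]
  by_cases h1 : ((PySem.Dict.mk stock).getD "patterns_raw" []).any (fun r => pvIsBreakout (PySem.Str.lower r)) <;>
  by_cases h2 : ((PySem.Dict.mk stock).getD "patterns_raw" []).any (fun r => pvIsBase (PySem.Str.lower r)) <;>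
  by_cases h3 : ((PySem.Dict.mk stock).getD "patterns_raw" []).any (fun r => pvIsPivot (PySem.Str.lower r)) <;>
  simp [h1, h2, h3]
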